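-- pv_equiv track=rewrite | github.com/mengjihua/Binary-Battle | 每日一题/2025.10/2598.py | findSmallestInteger
-- ===== SOURCE A (Python) =====
-- from typing import List, Tuple, Dict, Set, Optional
-- from collections import defaultdict, Counter, deque
--
-- def findSmallestInteger(nums: List[int], value: int) -> int:
--     cnt = defaultdict(int)
--     for num in nums:
--         cnt[(num % value + value) % value] += 1
--
--     i = 0
--     while True:
--         if cnt[i % value] > 0:
--             cnt[i % value] -= 1
--             i += 1
--         else:
--             return i
-- ===== SOURCE B (Python) =====
-- from collections import Counter
--
-- def findSmallestInteger(nums, value):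
--     m = abs(value)
--     cnt = Counter(num % m for num in nums)
--     # The answer is at most len(nums): residue classes beyond that can never give the minimum.
--     return min(cnt[r] * m + r for r in range(min(m, len(nums) + 1)))
-- ===== Notes on version B (the rewrite author's own statement) =====
-- stated objective: simpler
-- what changed: Replaces A's greedy simulate-the-MEX while-loop (decrementing residue counts one i at a time) with a closed-form minimum: the answer is min over residues r of count[r]*|value| + r, truncated to r <= len(nums) since the answer never exceeds len(nums); Pre_ excludes value = 0, on which both programs raise (A: ZeroDivisionError).
import Mathlib
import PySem

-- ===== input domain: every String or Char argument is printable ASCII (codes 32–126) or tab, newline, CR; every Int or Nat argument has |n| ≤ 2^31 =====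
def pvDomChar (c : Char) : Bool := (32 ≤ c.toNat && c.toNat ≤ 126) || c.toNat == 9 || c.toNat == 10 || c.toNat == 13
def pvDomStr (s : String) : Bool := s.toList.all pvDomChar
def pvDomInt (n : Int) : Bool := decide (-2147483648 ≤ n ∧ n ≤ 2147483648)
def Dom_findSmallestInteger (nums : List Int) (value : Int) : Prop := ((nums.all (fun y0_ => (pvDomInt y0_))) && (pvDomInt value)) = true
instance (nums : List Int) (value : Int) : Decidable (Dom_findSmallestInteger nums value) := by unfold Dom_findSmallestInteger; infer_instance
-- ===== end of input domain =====

-- B replaces A's greedy simulate-the-MEX while-loop with a closed-form minimum over residue classes.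

-- ===== PORT A =====
-- A's `while True` loop; each executed decrement step consumes one counted element, so the loop
-- returns after at most nums.length + 1 iterations: the fuel below only makes the recursion
-- structural and is never exhausted on Pre_ inputs (the fuel-0 branch returns the current i).
def findSmallestIntegerLoopA (cnt : PySem.Dict Int Int) (value : Int) (i : Int) : Nat → Int
  | 0 => i
  | fuel + 1 =>
    if cnt.getD (PySem.Int.mod i value) 0 > 0 then
      findSmallestIntegerLoopA (cnt.modify (PySem.Int.mod i value) 0 (· - 1)) value (i + 1) fuel
    else i

def findSmallestInteger (nums : List Int) (value : Int) : Int :=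
  let cnt := nums.foldl
    (fun d num => d.modify (PySem.Int.mod (PySem.Int.mod num value + value) value) 0 (· + 1))
    PySem.Dict.empty
  findSmallestIntegerLoopA cnt value 0 (nums.length + 1)

-- ===== PORT B =====
def findSmallestInteger_alt (nums : List Int) (value : Int) : Int :=
  let m : Int := |value|
  let cnt := PySem.Dict.counter (nums.map (fun num => PySem.Int.mod num m))
  let cands := (PySem.List.pyRange 0 (min m ((nums.length : Int) + 1)) 1).map
    (fun r => cnt.getD r 0 * m + r)
  (PySem.List.min? cands (fun x => x)).getD 0

-- ===== PRECONDITION & SPEC =====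
-- Pre_ excludes exactly value = 0, on which the Python A raises ZeroDivisionError (B raises there too).
def Pre_findSmallestInteger (nums : List Int) (value : Int) : Prop := value ≠ 0

instance (nums : List Int) (value : Int) : Decidable (Pre_findSmallestInteger nums value) := by
  unfold Pre_findSmallestInteger; infer_instance

def pvWitness_findSmallestInteger : List Int × Int := ([1, 2, -3, 4], 3)

def Spec_findSmallestInteger (nums : List Int) (value : Int) (out : Int) : Prop :=
  out = findSmallestInteger_alt nums value

instance (nums : List Int) (value : Int) (out : Int) : Decidable (Spec_findSmallestInteger nums value out) := by
  unfold Spec_findSmallestInteger; infer_instance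

-- ===== CLAIM (what is proved, stated in full; the proofs are below) =====
def Claim_equal_findSmallestInteger : Prop := ∀ (nums : List Int) (value : Int),
  Dom_findSmallestInteger nums value → Pre_findSmallestInteger nums value →
  Spec_findSmallestInteger nums value (findSmallestInteger nums value)

-- ===== LEMMAS AND PROOFS =====

-- `pvUsed m j r` = how many times A's loop has decremented residue class r after reaching index j.
def pvUsed (m j r : Nat) : Nat := j / m + (if r < j % m then 1 else 0)

theorem pvSum_ind (s m : Nat) (h : s ≤ m) : ∑ r ∈ Finset.range m, (if r < s then 1 else 0) = s := by
  have hf : (Finset.range m).filter (fun r => r < s) = Finset.range s := by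
    ext x; simp [Finset.mem_filter, Finset.mem_range]; omega
  rw [Finset.sum_boole, hf, Finset.card_range, Nat.cast_id]

theorem pvSum_used (m j : Nat) (hm : 0 < m) : ∑ r ∈ Finset.range m, pvUsed m j r = j := by
  unfold pvUsed
  rw [Finset.sum_add_distrib, Finset.sum_const, Finset.card_range,
    pvSum_ind _ _ (le_of_lt (Nat.mod_lt _ hm))]
  have := Nat.div_add_mod j m
  omega

theorem pvStop_iff (m j : Nat) (hm : 0 < m) (C : Nat → Nat) :
    (C (j % m) * m + j % m ≤ j) ↔ C (j % m) ≤ j / m := by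
  have hdm : (j/m)*m + j%m = j := by rw [Nat.mul_comm]; exact Nat.div_add_mod j m
  constructor
  · intro h
    have : C (j % m) * m ≤ (j/m) * m := by omega
    exact Nat.le_of_mul_le_mul_right this hm
  · intro h
    have : C (j % m) * m ≤ (j/m) * m := Nat.mul_le_mul_right m h
    omega

theorem pvUsed_step (m j r : Nat) (hm : 0 < m) (hr : r < m) :
    pvUsed m (j+1) r = pvUsed m j r + (if r = j % m then 1 else 0) := by
  unfold pvUsed
  have hsm : j % m < m := Nat.mod_lt _ hm
  have hj1 : j + 1 = m * (j/m) + (j%m + 1) := by have := Nat.div_add_mod j m; omega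
  have h1 : (j+1) % m = (j%m+1) % m := by rw [hj1, Nat.mul_add_mod]
  have h2 : (j+1) / m = j/m + (j%m+1)/m := by rw [hj1, Nat.mul_add_div hm]
  by_cases hcase : j % m + 1 < m
  · rw [h1, h2, Nat.mod_eq_of_lt hcase, Nat.div_eq_of_lt hcase]; split_ifs <;> omega
  · have hm1 : j % m + 1 = m := by omega
    rw [h1, h2, hm1, Nat.mod_self, Nat.div_self hm]; split_ifs <;> omega

-- runtime invariant: while no stop index has been passed, consumption stays below the counts
theorem pvNoStop_used (m : Nat) (hm : 0 < m) (C : Nat → Nat) :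
    ∀ j, (∀ k, k < j → ¬ (C (k % m) * m + k % m ≤ k)) → ∀ r, r < m → pvUsed m j r ≤ C r := by
  intro j
  induction j with
  | zero => intro _ r hr; simp [pvUsed]
  | succ j ih =>
    intro h r hr
    have ihr := ih (fun k hk => h k (Nat.lt_succ_of_lt hk))
    have hstop := h j (Nat.lt_succ_self j)
    rw [pvStop_iff m j hm C] at hstop
    have hlt : j / m < C (j % m) := by omega
    have husedj : pvUsed m j (j % m) = j / m := by simp [pvUsed]
    rw [pvUsed_step m j r hm hr]
    split_ifs with he
    · subst he; omega
    · exact Nat.le_of_lt_succ (Nat.lt_succ_of_le (ihr r hr))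

theorem pvMod_unique (v x r : Int) (hv : v ≠ 0) (hdvd : v ∣ x - r)
    (hr : (0 < v → 0 ≤ r ∧ r < v) ∧ (v < 0 → v < r ∧ r ≤ 0)) :
    PySem.Int.mod x v = r := by
  have h1 := PySem.Int.floordiv_mul_add_mod x v
  have h3 : v ∣ x - PySem.Int.mod x v := ⟨PySem.Int.floordiv x v, by linarith⟩
  have hd2 : v ∣ PySem.Int.mod x v - r := by
    have h4 := dvd_sub hdvd h3
    have h5 : x - r - (x - PySem.Int.mod x v) = PySem.Int.mod x v - r := by ring
    rwa [h5] at h4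
  have hd3 : |v| ∣ PySem.Int.mod x v - r := (abs_dvd _ _).mpr hd2
  have habs : |PySem.Int.mod x v - r| < |v| := by
    rcases lt_or_gt_of_ne hv with hneg | hpos
    · have hb := PySem.Int.mod_neg_bounds x (b := v) hneg
      have := hr.2 hneg
      rw [abs_lt, abs_of_neg hneg]; omega
    · have h0 := PySem.Int.mod_nonneg x (b := v) hpos
      have hlt := PySem.Int.mod_lt x (b := v) hpos
      have := hr.1 hpos
      rw [abs_lt, abs_of_pos hpos]; omega
  have := Int.eq_zero_of_abs_lt_dvd hd3 habs
  omega

theorem pvMod_range (v x : Int) :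
    (0 < v → 0 ≤ PySem.Int.mod x v ∧ PySem.Int.mod x v < v) ∧
    (v < 0 → v < PySem.Int.mod x v ∧ PySem.Int.mod x v ≤ 0) :=
  ⟨fun hp => ⟨PySem.Int.mod_nonneg x hp, PySem.Int.mod_lt x hp⟩,
   fun hn => PySem.Int.mod_neg_bounds x hn⟩

theorem pvMod_dvd_sub (v x : Int) : v ∣ x - PySem.Int.mod x v :=
  ⟨PySem.Int.floordiv x v, by have := PySem.Int.floordiv_mul_add_mod x v; linarith⟩

-- the ((num % v) + v) % v normalisation collapses to num % v
theorem pvKeyA_eq (v x : Int) (hv : v ≠ 0) :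
    PySem.Int.mod (PySem.Int.mod x v + v) v = PySem.Int.mod x v :=
  pvMod_unique v _ _ hv (by simp) (pvMod_range v x)

-- num % v is num % |v| pushed through % v
theorem pvKey_abs (v x : Int) (hv : v ≠ 0) :
    PySem.Int.mod (PySem.Int.mod x |v|) v = PySem.Int.mod x v := by
  refine pvMod_unique v _ _ hv ?_ (pvMod_range v x)
  have h1 : |v| ∣ x - PySem.Int.mod x |v| := pvMod_dvd_sub |v| x
  have h2 : v ∣ x - PySem.Int.mod x |v| := (abs_dvd _ _).mp h1
  have h3 := dvd_sub (pvMod_dvd_sub v x) h2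
  have h4 : x - PySem.Int.mod x v - (x - PySem.Int.mod x |v|) =
      PySem.Int.mod x |v| - PySem.Int.mod x v := by ring
  rw [h4] at h3
  exact h3

-- r ↦ r % v is injective on [0, |v|)
theorem pvKappa_inj (v r1 r2 : Int)
    (h1 : 0 ≤ r1) (h1' : r1 < |v|) (h2 : 0 ≤ r2) (h2' : r2 < |v|)
    (he : PySem.Int.mod r1 v = PySem.Int.mod r2 v) : r1 = r2 := by
  have d1 := pvMod_dvd_sub v r1
  have d2 := pvMod_dvd_sub v r2
  rw [he] at d1
  have d3 := dvd_sub d1 d2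
  have h4 : r1 - PySem.Int.mod r2 v - (r2 - PySem.Int.mod r2 v) = r1 - r2 := by ring
  rw [h4] at d3
  have := Int.eq_zero_of_abs_lt_dvd ((abs_dvd _ _).mpr d3) (by rw [abs_lt]; omega)
  omega

-- mod ↑j v depends only on j % m  (m = v.natAbs)
theorem pvMod_nat_period (v : Int) (j : Nat) (hv : v ≠ 0) :
    PySem.Int.mod (j : Int) v = PySem.Int.mod ((j % v.natAbs : Nat) : Int) v := by
  refine pvMod_unique v (j : Int) _ hv ?_ (pvMod_range v _)
  have habs : |v| = (v.natAbs : Int) := Int.abs_eq_natAbs v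
  have h1 : v ∣ (j : Int) - ((j % v.natAbs : Nat) : Int) := by
    rw [← abs_dvd, habs]
    have heq : (j : Int) - ((j % v.natAbs : Nat) : Int) = ((v.natAbs * (j / v.natAbs) : Nat) : Int) := by
      have hn := Nat.div_add_mod j v.natAbs
      have hn2 : ((v.natAbs * (j / v.natAbs) : Nat) : Int) + ((j % v.natAbs : Nat) : Int) = (j : Int) := by
        exact_mod_cast congrArg (Nat.cast : Nat → Int) hn
      linarith
    rw [heq]
    exact_mod_cast Int.natCast_dvd_natCast.mpr (Dvd.intro _ rfl)
  have h2 := pvMod_dvd_sub v ((j % v.natAbs : Nat) : Int)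
  have h3 := dvd_add h1 h2
  have h4 : (j : Int) - ((j % v.natAbs : Nat) : Int) +
      (((j % v.natAbs : Nat) : Int) - PySem.Int.mod ((j % v.natAbs : Nat) : Int) v) =
      (j : Int) - PySem.Int.mod ((j % v.natAbs : Nat) : Int) v := by ring
  rwa [h4] at h3

-- A's while-loop re-expressed over a pure counter function (the Dict abstracted away)
def pvLoopP (f : Int → Int) (v i : Int) : Nat → Int
  | 0 => i
  | fuel + 1 =>
    if f (PySem.Int.mod i v) > 0 then
      pvLoopP (fun k => if k = PySem.Int.mod i v then f k - 1 else f k) v (i + 1) fuel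
    else i

theorem pvLoopP_spec (v : Int) (hv : v ≠ 0) (C : Nat → Nat) (M : Nat)
    (hstopM : C (M % v.natAbs) * v.natAbs + M % v.natAbs ≤ M)
    (hleast : ∀ k, k < M → ¬ (C (k % v.natAbs) * v.natAbs + k % v.natAbs ≤ k)) :
    ∀ (fuel j : Nat) (f : Int → Int),
      (∀ r, r < v.natAbs → f (PySem.Int.mod (r : Int) v) = (C r : Int) - (pvUsed v.natAbs j r : Int)) →
      j ≤ M → M < j + fuel →
      pvLoopP f v (j : Int) fuel = (M : Int) := by
  intro fuel
  induction fuel with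
  | zero => intro j f hf hjM hfuel; exact absurd hfuel (by omega)
  | succ fuel ih =>
    intro j f hf hjM hfuel
    have hm : 0 < v.natAbs := Int.natAbs_pos.mpr hv
    have habs : |v| = (v.natAbs : Int) := Int.abs_eq_natAbs v
    have hsm : j % v.natAbs < v.natAbs := Nat.mod_lt _ hm
    have hkey : PySem.Int.mod (j : Int) v = PySem.Int.mod ((j % v.natAbs : Nat) : Int) v :=
      pvMod_nat_period v j hv
    have hfj : f (PySem.Int.mod (j : Int) v)
        = (C (j % v.natAbs) : Int) - (pvUsed v.natAbs j (j % v.natAbs) : Int) := by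
      rw [hkey]; exact hf _ hsm
    have husedj : pvUsed v.natAbs j (j % v.natAbs) = j / v.natAbs := by simp [pvUsed]
    simp only [pvLoopP]
    by_cases hstop : C (j % v.natAbs) * v.natAbs + j % v.natAbs ≤ j
    · have hMj : M = j := by
        rcases Nat.lt_or_ge j M with h | h
        · exact absurd hstop (hleast j h)
        · omega
      have hdiv : C (j % v.natAbs) ≤ j / v.natAbs := (pvStop_iff v.natAbs j hm C).mp hstop
      have hcond : ¬ (f (PySem.Int.mod (j : Int) v) > 0) := by
        rw [hfj, husedj]
        have : ((C (j % v.natAbs) : Nat) : Int) ≤ ((j / v.natAbs : Nat) : Int) := by exact_mod_cast hdiv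
        omega
      rw [if_neg hcond, hMj]
    · have hdiv : ¬ C (j % v.natAbs) ≤ j / v.natAbs := fun h => hstop ((pvStop_iff v.natAbs j hm C).mpr h)
      have hcond : f (PySem.Int.mod (j : Int) v) > 0 := by
        rw [hfj, husedj]
        have : ((j / v.natAbs : Nat) : Int) < ((C (j % v.natAbs) : Nat) : Int) := by exact_mod_cast Nat.lt_of_not_le hdiv
        omega
      rw [if_pos hcond]
      have hjM' : j < M := by
        rcases Nat.lt_or_ge j M with h | h
        · exact h
        · have : j = M := by omega
          exact absurd (this ▸ hstopM) hstop
      have hcast : (j : Int) + 1 = ((j + 1 : Nat) : Int) := by push_cast; ring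
      rw [hcast]
      apply ih (j + 1) _ ?_ (by omega) (by omega)
      intro r hr
      show (if PySem.Int.mod (r : Int) v = PySem.Int.mod (j : Int) v
            then f (PySem.Int.mod (r : Int) v) - 1 else f (PySem.Int.mod (r : Int) v))
          = (C r : Int) - (pvUsed v.natAbs (j + 1) r : Int)
      rw [pvUsed_step v.natAbs j r hm hr]
      by_cases he : r = j % v.natAbs
      · have heq : PySem.Int.mod (r : Int) v = PySem.Int.mod (j : Int) v := by
          rw [hkey, he]
        rw [if_pos heq, hf r hr, if_pos he]
        push_cast
        ring
      · have hne : PySem.Int.mod (r : Int) v ≠ PySem.Int.mod (j : Int) v := by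
          rw [hkey]
          intro hc
          apply he
          have hinj := pvKappa_inj v (r : Int) ((j % v.natAbs : Nat) : Int)
            (by positivity) (by rw [habs]; exact_mod_cast hr)
            (by positivity) (by rw [habs]; exact_mod_cast hsm) hc
          exact_mod_cast hinj
        rw [if_neg hne, hf r hr, if_neg he]
        push_cast
        ring

theorem pvLoopA_eq_loopP (v : Int) : ∀ (fuel : Nat) (d : PySem.Dict Int Int) (f : Int → Int) (i : Int),
    (∀ k, d.getD k 0 = f k) → findSmallestIntegerLoopA d v i fuel = pvLoopP f v i fuel := by
  intro fuel
  induction fuel with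
  | zero => intro d f i h; rfl
  | succ fuel ih =>
    intro d f i h
    simp only [findSmallestIntegerLoopA, pvLoopP, h]
    split_ifs with hc
    · apply ih
      intro k
      rw [PySem.Dict.getD_modify, h, h]
      split_ifs with he <;> simp [he]
    · rfl

-- count of A's keys at (r % v) equals count of (· % |v|)-keys at r, for r ∈ [0, |v|)

theorem pvCount_key (v : Int) (hv : v ≠ 0) (r : Int) (h0 : 0 ≤ r) (h1 : r < |v|) :
    ∀ nums : List Int,
      (nums.map (fun x => PySem.Int.mod (PySem.Int.mod x v + v) v)).count (PySem.Int.mod r v)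
        = (nums.map (fun x => PySem.Int.mod x |v|)).count r := by
  intro nums
  induction nums with
  | nil => rfl
  | cons x l ihl =>
    simp only [List.map_cons, List.count_cons, ihl]
    congr 1
    have hbeq : (PySem.Int.mod (PySem.Int.mod x v + v) v == PySem.Int.mod r v)
        = (PySem.Int.mod x |v| == r) := by
      rw [pvKeyA_eq v x hv]
      by_cases he : PySem.Int.mod x |v| = r
      · rw [← he, pvKey_abs v x hv]
        simp
      · have habs0 : (0:Int) < |v| := abs_pos.mpr hv
        have hne : PySem.Int.mod x v ≠ PySem.Int.mod r v := by
          rw [← pvKey_abs v x hv]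
          intro hc
          exact he (pvKappa_inj v _ r (PySem.Int.mod_nonneg x habs0)
            (PySem.Int.mod_lt x habs0) h0 h1 hc)
        simp [he, hne]
    rw [hbeq]

-- residue counts of a list with all elements in [0, m) sum to its length
theorem pvSum_count (m : Nat) : ∀ l : List Int, (∀ x ∈ l, 0 ≤ x ∧ x < (m : Int)) →
    ∑ r ∈ Finset.range m, l.count ((r : Nat) : Int) = l.length := by
  intro l
  induction l with
  | nil => simp
  | cons a l ihl =>
    intro h
    have ha := h a (List.mem_cons_self)
    have hl := ihl (fun x hx => h x (List.mem_cons_of_mem a hx))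
    obtain ⟨r0, hr0, hr0e⟩ : ∃ r0 : Nat, r0 < m ∧ a = (r0 : Int) :=
      ⟨a.toNat, by omega, by omega⟩
    simp only [List.count_cons]
    rw [Finset.sum_add_distrib, hl]
    have : ∀ r ∈ Finset.range m, (if a == ((r : Nat) : Int) then 1 else 0) = (if r = r0 then 1 else 0) := by
      intro r _
      by_cases he : r = r0
      · simp [he, hr0e]
      · have : a ≠ ((r : Nat) : Int) := by omega
        simp [he, this]
    rw [Finset.sum_congr rfl this, Finset.sum_ite_eq' (Finset.range m) r0 (fun _ => 1)]
    simp [hr0, List.length_cons]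

theorem pvMain (nums : List Int) (v : Int) (hv : v ≠ 0) :
    findSmallestInteger nums v = findSmallestInteger_alt nums v := by
  have hm : 0 < v.natAbs := Int.natAbs_pos.mpr hv
  have habs : |v| = (v.natAbs : Int) := Int.abs_eq_natAbs v
  have habs0 : (0:Int) < |v| := abs_pos.mpr hv
  set m := v.natAbs with hmdef
  set lB := nums.map (fun x => PySem.Int.mod x |v|) with hlB
  set C : Nat → Nat := fun r => lB.count ((r : Nat) : Int) with hC
  set n := nums.length with hn
  have hlen : lB.length = n := by simp [hlB, hn]
  have hsum : ∑ r ∈ Finset.range m, C r = n := by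
    rw [hC, ← hlen]
    apply pvSum_count
    intro x hx
    rw [hlB] at hx
    obtain ⟨y, _, hy⟩ := List.mem_map.mp hx
    constructor
    · rw [← hy]; exact PySem.Int.mod_nonneg y habs0
    · rw [← hy, ← habs]; exact PySem.Int.mod_lt y habs0
  -- the closed-form minimum
  set S := (Finset.range m).image (fun r => C r * m + r) with hS
  have hSne : S.Nonempty := ⟨C 0 * m + 0, Finset.mem_image_of_mem _ (Finset.mem_range.mpr hm)⟩
  set M := S.min' hSne with hM
  obtain ⟨rs, hrs, hrse⟩ := Finset.mem_image.mp (S.min'_mem hSne)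
  rw [Finset.mem_range] at hrs
  rw [← hM] at hrse
  have hle : ∀ r, r < m → M ≤ C r * m + r := fun r hr =>
    Finset.min'_le _ _ (Finset.mem_image_of_mem _ (Finset.mem_range.mpr hr))
  have hMmod : M % m = rs ∧ M / m = C rs := by
    have h1 : M = m * C rs + rs := by rw [← hrse]; ring
    constructor
    · rw [h1, Nat.mul_add_mod, Nat.mod_eq_of_lt hrs]
    · rw [h1, Nat.mul_add_div hm, Nat.div_eq_of_lt hrs]; omega
  have hstopM : C (M % m) * m + M % m ≤ M := by
    rw [hMmod.1, hrse]
  have hleast : ∀ k, k < M → ¬ (C (k % m) * m + k % m ≤ k) := by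
    intro k hk hstopk
    have := hle (k % m) (Nat.mod_lt _ hm)
    omega
  have hMn : M ≤ n := by
    have hinv := pvNoStop_used m hm C M hleast
    calc M = ∑ r ∈ Finset.range m, pvUsed m M r := (pvSum_used m M hm).symm
    _ ≤ ∑ r ∈ Finset.range m, C r := Finset.sum_le_sum (fun r hr => hinv r (Finset.mem_range.mp hr))
    _ = n := hsum
  -- A side
  have hAside : findSmallestInteger nums v = (M : Int) := by
    show findSmallestIntegerLoopA _ v 0 (nums.length + 1) = (M : Int)
    rw [← List.foldl_map (f := fun x => PySem.Int.mod (PySem.Int.mod x v + v) v)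
      (g := fun (d : PySem.Dict Int Int) (x : Int) => d.modify x 0 (· + 1))]
    rw [pvLoopA_eq_loopP v _ _
      (fun k => (((nums.map (fun x => PySem.Int.mod (PySem.Int.mod x v + v) v)).count k : Nat) : Int)) 0
      (by intro k; rw [PySem.Dict.getD_foldl_modify_add_one]; simp)]
    have h0 : (0 : Int) = ((0 : Nat) : Int) := rfl
    rw [h0]
    apply pvLoopP_spec v hv C M hstopM hleast (n + 1) 0
    · intro r hr
      rw [pvCount_key v hv (r : Int) (by positivity) (by rw [habs]; exact_mod_cast hr)]
      simp [pvUsed, C, lB]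
    · omega
    · omega
  -- B side
  have hBside : findSmallestInteger_alt nums v = (M : Int) := by
    show (PySem.List.min? ((PySem.List.pyRange 0 (min |v| ((n : Int) + 1)) 1).map
        (fun r => (PySem.Dict.counter (nums.map (fun num => PySem.Int.mod num |v|))).getD r 0 * |v| + r))
        (fun x => x)).getD 0 = (M : Int)
    set K := min |v| ((n : Int) + 1) with hK
    set g : Int → Int := fun r =>
      (PySem.Dict.counter (nums.map (fun num => PySem.Int.mod num |v|))).getD r 0 * |v| + r with hg
    have hgval : ∀ r : Int, g r = (lB.count r : Int) * |v| + r := by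
      intro r
      rw [hg]
      simp only [PySem.Dict.getD_counter]
      rfl
    have hK1 : (1 : Int) ≤ K := by
      rw [hK]
      have : (1:Int) ≤ |v| := by omega
      omega
    set cands := (PySem.List.pyRange 0 K 1).map g with hcands
    have hMmem : (M : Int) ∈ cands := by
      rw [hcands]
      apply List.mem_map.mpr
      refine ⟨(rs : Int), ?_, ?_⟩
      · apply (PySem.List.mem_pyRange_one).mpr
        constructor
        · positivity
        · rw [hK]
          have h1 : (rs : Int) < |v| := by rw [habs]; exact_mod_cast hrs
          have hrsn : rs ≤ n := by
            have : rs ≤ M := by rw [← hrse]; exact Nat.le_add_left rs _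
            omega
          have h2 : (rs : Int) < (n : Int) + 1 := by exact_mod_cast Nat.lt_succ_of_le hrsn
          omega
      · rw [hgval, habs, ← hrse]
        push_cast [hC]
        ring
    have hpr : PySem.List.pyRange 0 K 1 = 0 :: PySem.List.pyRange 1 K 1 :=
      PySem.List.pyRange_one_cons (by omega)
    have hcne : cands ≠ [] := by rw [hcands, hpr]; simp
    cases hmv : PySem.List.min? cands (fun x => x) with
    | none =>
      rw [hcands, hpr, List.map_cons, PySem.List.min?_id_cons] at hmv
      simp at hmv
    | some mval =>
      have hmem := PySem.List.min?_mem hmv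
      have hmin := PySem.List.min?_isMin hmv
      have hup : mval ≤ (M : Int) := hmin _ hMmem
      have hdn : (M : Int) ≤ mval := by
        rw [hcands] at hmem
        obtain ⟨rI, hrI, hrIe⟩ := List.mem_map.mp hmem
        obtain ⟨hb0, hbK⟩ := (PySem.List.mem_pyRange_one).mp hrI
        set rN := rI.toNat with hrNdef
        have he : rI = ((rN : Nat) : Int) := (Int.toNat_of_nonneg hb0).symm
        have hrN : rN < m := by
          have h1 : rI < (m : Int) := by rw [← habs, hK] at *; omega
          omega
        have hgv : g rI = ((C rN * m + rN : Nat) : Int) := by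
          rw [hgval, habs, he]
          push_cast [hC]
          ring
        rw [← hrIe, hgv]
        exact_mod_cast hle rN hrN
      simp only [Option.getD_some]
      exact le_antisymm hup hdn
  rw [hAside, hBside]

-- ===== VERDICT (by name: the statement is the Claim_ definition above) =====
theorem findSmallestInteger_spec : Claim_equal_findSmallestInteger := by
  intro nums value _ hpre
  unfold Spec_findSmallestInteger
  exact pvMain nums value hpre
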